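-- pv_equiv track=rewrite | github.com/spatial-data-lab/Computational-Methods-and-GIS-Applications-in-Social-Science-KNIME-Lab-Manual-Data | Florida/Network Community Detection Method for Python Script.py | partition_com2node
-- ===== SOURCE A (Python) =====
-- def partition_com2node(partition):
--     com2node_dict = {k: [] for k in list(set(partition.values()))}
--     for node, com in partition.items():
--         if bool(com2node_dict.get(com)):
--             com2node_dict[com].append(node)
--         else:
--             com2node_dict[com] = [node]
--     return com2node_dict
-- ===== SOURCE B (Python) =====
-- def partition_com2node(partition):
--     return {c: [node for node, com in partition.items() if com == c]
--             for c in set(partition.values())}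
-- ===== Notes on version B (the rewrite author's own statement) =====
-- stated objective: simpler
-- what changed: A pre-seeds a dict with empty lists and fills it in one grouping pass with a truthiness-tested get/append/assign branch; B is a single dict comprehension that, for each distinct community, filters the items once.
import Mathlib
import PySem

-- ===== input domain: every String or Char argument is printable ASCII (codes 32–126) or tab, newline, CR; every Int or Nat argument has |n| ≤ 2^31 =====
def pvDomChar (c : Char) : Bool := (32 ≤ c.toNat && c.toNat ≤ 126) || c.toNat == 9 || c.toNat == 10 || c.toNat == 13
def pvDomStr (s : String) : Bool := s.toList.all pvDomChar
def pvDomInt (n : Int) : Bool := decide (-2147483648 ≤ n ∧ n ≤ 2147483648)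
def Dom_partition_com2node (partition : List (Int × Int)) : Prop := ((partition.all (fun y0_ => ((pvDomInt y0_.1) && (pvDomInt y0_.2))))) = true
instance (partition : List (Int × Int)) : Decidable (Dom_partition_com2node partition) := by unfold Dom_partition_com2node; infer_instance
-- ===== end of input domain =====

-- B replaces A's stateful grouping pass (seed-with-[]-then-append/assign) by one dict
-- comprehension filtering the items per distinct community: simpler, not faster.
-- Community key order is the distinct-values order (Python set iteration is not modelled;
-- dict outputs are compared ignoring order).

-- ===== PORT A =====
def partition_com2node (partition : List (Int × Int)) : List (Int × List Int) :=
  let d : PySem.Dict Int Int := PySem.Dict.ofList partition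
  let init : PySem.Dict Int (List Int) :=
    (PySem.Set.ofList d.values).foldl (fun acc k => acc.insert k []) PySem.Dict.empty
  let fin : PySem.Dict Int (List Int) :=
    d.items.foldl (fun acc p =>
      if ((acc.get? p.2).getD []) ≠ [] then acc.modify p.2 [] (fun l => l ++ [p.1])
      else acc.insert p.2 [p.1]) init
  fin.items

-- ===== PORT B =====
def partition_com2node_alt (partition : List (Int × Int)) : List (Int × List Int) :=
  let d : PySem.Dict Int Int := PySem.Dict.ofList partition
  (PySem.Set.ofList d.values).map (fun c =>
    (c, (d.items.filter (fun p => p.2 == c)).map (fun p => p.1)))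

-- ===== PRECONDITION & SPEC =====
def Spec_partition_com2node (partition : List (Int × Int)) (out : List (Int × List Int)) : Prop := out = partition_com2node_alt partition
instance (partition : List (Int × Int)) (out : List (Int × List Int)) : Decidable (Spec_partition_com2node partition out) := by unfold Spec_partition_com2node; infer_instance

-- ===== CLAIM (what is proved, stated in full; the proofs are below) =====
def Claim_equal_partition_com2node : Prop := ∀ (partition : List (Int × Int)), Dom_partition_com2node partition → Spec_partition_com2node partition (partition_com2node partition)

-- ===== LEMMAS AND PROOFS =====

-- the state of A's grouping loop after processing the prefix `pr`, keyed by the communities S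
def pvState (S : List Int) (pr : List (Int × Int)) : PySem.Dict Int (List Int) :=
  PySem.Dict.mk (S.map (fun c => (c, (pr.filter (fun p => p.2 == c)).map (fun p => p.1))))

lemma pvState_keys (S : List Int) (pr : List (Int × Int)) : (pvState S pr).keys = S := by
  simp [pvState, PySem.Dict.keys_mk, List.map_map, Function.comp_def]

lemma pvState_get (S : List Int) (hS : S.Nodup) (pr : List (Int × Int)) {c : Int} (hc : c ∈ S) :
    (pvState S pr).getD c [] = (pr.filter (fun p => p.2 == c)).map (fun p => p.1) := by
  apply PySem.Dict.getD_of_mem_items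
  · exact List.mem_map.mpr ⟨c, hc, rfl⟩
  · rw [pvState_keys]; exact hS

lemma pvState_step (S : List Int) (hS : S.Nodup) (pr : List (Int × Int)) (x : Int × Int)
    (hx : x.2 ∈ S) :
    (if (((pvState S pr).get? x.2).getD []) ≠ [] then
        (pvState S pr).modify x.2 [] (fun l => l ++ [x.1])
      else (pvState S pr).insert x.2 [x.1]) = pvState S (pr ++ [x]) := by
  have hcont : (pvState S pr).contains x.2 = true := by
    rw [PySem.Dict.contains_iff_mem_keys, pvState_keys]; exact hx
  have hget : ((pvState S pr).get? x.2).getD [] =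
      (pr.filter (fun p => p.2 == x.2)).map (fun p => p.1) := by
    rw [← PySem.Dict.getD_eq_get?_getD]; exact pvState_get S hS pr hx
  have hins : ∀ v : List Int, (pvState S pr).insert x.2 v =
      PySem.Dict.mk (S.map (fun c => if c == x.2 then (x.2, v) else
        (c, (pr.filter (fun p => p.2 == c)).map (fun p => p.1)))) := by
    intro v
    apply PySem.Dict.ext
    rw [PySem.Dict.items_insert_of_contains _ _ hcont]
    simp [pvState, List.map_map, Function.comp]
  have hboth : (if (((pvState S pr).get? x.2).getD []) ≠ [] then
        (pvState S pr).modify x.2 [] (fun l => l ++ [x.1])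
      else (pvState S pr).insert x.2 [x.1]) =
      (pvState S pr).insert x.2 ((pr.filter (fun p => p.2 == x.2)).map (fun p => p.1) ++ [x.1]) := by
    by_cases h : ((pvState S pr).get? x.2).getD [] = []
    · rw [if_neg (by simp [h]), hins]
      rw [hget] at h
      rw [h]
      simp [hins]
    · rw [if_pos h]
      simp only [PySem.Dict.modify]
      rw [PySem.Dict.getD_eq_get?_getD, hget]
  rw [hboth, hins]
  apply PySem.Dict.ext
  simp only [pvState]
  apply List.map_congr_left
  intro c _
  by_cases hcx : c = x.2
  · subst hcx
    simp [List.filter_append]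
  · have : (c == x.2) = false := by simp [hcx]
    simp only [this, List.filter_append]
    have hxc : (fun p : Int × Int => p.2 == c) (x.1, x.2) = false := by
      simp; exact fun h => hcx h.symm
    simp [hxc]

lemma pvState_fold (S : List Int) (hS : S.Nodup) :
    ∀ (rest pr : List (Int × Int)), (∀ x ∈ rest, x.2 ∈ S) →
    rest.foldl (fun acc p =>
      if ((acc.get? p.2).getD []) ≠ [] then acc.modify p.2 [] (fun l => l ++ [p.1])
      else acc.insert p.2 [p.1]) (pvState S pr) = pvState S (pr ++ rest) := by
  intro rest
  induction rest with
  | nil => intro pr _; simp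
  | cons x rest ih =>
    intro pr hmem
    rw [List.foldl_cons, pvState_step S hS pr x (hmem x (by simp))]
    rw [ih (pr ++ [x]) (fun y hy => hmem y (by simp [hy]))]
    simp

theorem partition_com2node_aux (d : PySem.Dict Int Int) :
    (d.items.foldl (fun acc p =>
        if ((acc.get? p.2).getD []) ≠ [] then acc.modify p.2 [] (fun l => l ++ [p.1])
        else acc.insert p.2 [p.1])
      ((PySem.Set.ofList d.values).foldl (fun acc k => acc.insert k []) PySem.Dict.empty)).items
    = (PySem.Set.ofList d.values).map (fun c =>
        (c, (d.items.filter (fun p => p.2 == c)).map (fun p => p.1))) := by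
  have hS : (PySem.Set.ofList d.values).Nodup := PySem.Set.nodup_ofList _
  have hinit : ((PySem.Set.ofList d.values).foldl (fun acc k => acc.insert k []) PySem.Dict.empty)
      = pvState (PySem.Set.ofList d.values) [] := by
    apply PySem.Dict.ext
    rw [PySem.Dict.items_foldl_insert_fresh (PySem.Set.ofList d.values) (fun k => k)
        (fun _ => ([] : List Int)) PySem.Dict.empty
        (fun a _ => by simp [PySem.Dict.contains_empty]) (by simpa using hS)]
    simp [pvState, PySem.Dict.empty]
  have hmem : ∀ x ∈ d.items, x.2 ∈ PySem.Set.ofList d.values := by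
    intro x hx
    simp only [PySem.Set.mem_ofList, PySem.Dict.values]
    exact List.mem_map.mpr ⟨x, hx, rfl⟩
  rw [hinit, pvState_fold _ hS d.items [] hmem]
  simp [pvState]

theorem partition_com2node_eq (partition : List (Int × Int)) :
    partition_com2node partition = partition_com2node_alt partition :=
  partition_com2node_aux (PySem.Dict.ofList partition)

-- ===== VERDICT (by name: the statement is the Claim_ definition above) =====
theorem partition_com2node_spec : Claim_equal_partition_com2node := by
  intro partition _
  unfold Spec_partition_com2node
  exact partition_com2node_eq partition
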